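-- pv_equiv track=rewrite | github.com/tkp75/studyNotes | learn-python-from-scratch/ex10.py | count_low_high
-- ===== SOURCE A (Python) =====
-- def count_low_high(list):
--   low=0
--   high=0
--   for i in list:
--     if i > 50 or i%3 == 0:
--       high+=1
--     else:
--       low+=1
--   return [low, high]
-- ===== SOURCE B (Python) =====
-- def count_low_high(list):
--   if len(list) == 0:
--     return [0, 0]
--   if len(list) == 1:
--     i = list[0]
--     return [0, 1] if i > 50 or i % 3 == 0 else [1, 0]
--   mid = len(list) // 2
--   a = count_low_high(list[:mid])
--   b = count_low_high(list[mid:])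
--   return [a[0] + b[0], a[1] + b[1]]
-- ===== Notes on version B (the rewrite author's own statement) =====
-- stated objective: alternative
-- what changed: B replaces A's single linear two-counter loop with a divide-and-conquer recursion: it splits the list in half, recursively counts each half, and adds the resulting pairs, with singleton lists as base cases.
import Mathlib
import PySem

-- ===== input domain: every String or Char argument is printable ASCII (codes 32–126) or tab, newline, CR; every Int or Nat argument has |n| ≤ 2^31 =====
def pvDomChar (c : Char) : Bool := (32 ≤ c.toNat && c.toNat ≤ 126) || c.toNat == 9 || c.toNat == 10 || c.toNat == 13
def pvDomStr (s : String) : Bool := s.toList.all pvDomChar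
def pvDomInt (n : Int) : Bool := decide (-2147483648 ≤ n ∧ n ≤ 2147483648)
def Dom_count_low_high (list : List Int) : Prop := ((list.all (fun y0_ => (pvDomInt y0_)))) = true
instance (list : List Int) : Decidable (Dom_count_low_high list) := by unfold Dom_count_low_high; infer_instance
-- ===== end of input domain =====

set_option maxRecDepth 8000


-- B is an alternative decomposition: divide-and-conquer on halves with pairwise addition, instead of A's linear two-counter loop.

-- ===== PORT A =====
-- literal port of A: one loop over the list maintaining (low, high) counters
def count_low_high (list : List Int) : List Int :=
  let p := list.foldl (fun (s : Int × Int) i =>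
    if i > 50 ∨ PySem.Int.mod i 3 = 0 then (s.1, s.2 + 1) else (s.1 + 1, s.2)) (0, 0)
  [p.1, p.2]

-- ===== PORT B =====
-- port of B: split at len//2, recurse on both halves, add the pairs
def count_low_high_alt (list : List Int) : List Int :=
  if list.length = 0 then [0, 0]
  else if list.length = 1 then
    let i := list.headD 0      -- list[0], safe: list nonempty here
    if i > 50 ∨ PySem.Int.mod i 3 = 0 then [0, 1] else [1, 0]
  else
    let mid := list.length / 2
    let a := count_low_high_alt (list.take mid)   -- list[:mid]
    let b := count_low_high_alt (list.drop mid)   -- list[mid:]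
    [a.headD 0 + b.headD 0, a.getD 1 0 + b.getD 1 0]
termination_by list.length
decreasing_by
  · simp [List.length_take]; omega
  · simp [List.length_drop]; omega

-- ===== PRECONDITION & SPEC =====
def Spec_count_low_high (list : List Int) (out : List Int) : Prop := out = count_low_high_alt list
instance (list : List Int) (out : List Int) : Decidable (Spec_count_low_high list out) := by unfold Spec_count_low_high; infer_instance

-- ===== CLAIM (what is proved, stated in full; the proofs are below) =====
def Claim_equal_count_low_high : Prop := ∀ (list : List Int), Dom_count_low_high list → Spec_count_low_high list (count_low_high list)

-- ===== LEMMAS AND PROOFS =====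

def pvHigh (l : List Int) : Int :=
  ((l.filter (fun i => decide (i > 50 ∨ PySem.Int.mod i 3 = 0))).length : Int)

theorem count_low_high_alt_closed (l : List Int) :
    count_low_high_alt l = [(l.length : Int) - pvHigh l, pvHigh l] := by
  fun_induction count_low_high_alt l with
  | case1 l h =>
    have : l = [] := List.length_eq_zero_iff.mp h
    subst this; simp [pvHigh]
  | case2 l h h1 i hp =>
    obtain ⟨x, hx⟩ := List.length_eq_one_iff.mp h1
    subst hx
    have hi : i = x := rfl
    rw [hi] at hp
    rcases hp with h2 | h2
    · simp [pvHigh, h2]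
    · have h3 : (3:Int) ∣ x := (PySem.Int.mod_eq_zero_iff_dvd x 3).mp h2
      simp [pvHigh, h3]
  | case3 l h h1 i hp =>
    obtain ⟨x, hx⟩ := List.length_eq_one_iff.mp h1
    subst hx
    have hi : i = x := rfl
    rw [hi] at hp
    have h2 := not_or.mp hp
    have h3 : ¬(3:Int) ∣ x := fun hd => h2.2 ((PySem.Int.mod_eq_zero_iff_dvd x 3).mpr hd)
    simp [pvHigh, h2.1, h3]
  | case4 l h h1 mid a b iha ihb =>
    rw [show a = _ from iha, show b = _ from ihb]
    have hH : pvHigh l = pvHigh (l.take mid) + pvHigh (l.drop mid) := by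
      unfold pvHigh
      conv_lhs => rw [← List.take_append_drop mid l]
      rw [List.filter_append, List.length_append]
      push_cast; ring
    have hL : (l.length : Int) = ((l.take mid).length : Int) + ((l.drop mid).length : Int) := by
      have := List.take_append_drop mid l
      calc (l.length : Int) = (((l.take mid ++ l.drop mid).length : Nat) : Int) := by rw [this]
        _ = _ := by rw [List.length_append]; push_cast; ring
    simp only [List.headD_cons, List.getD_cons_succ, List.getD_cons_zero, List.cons.injEq,
      and_true, hH, hL]
    ring

theorem count_low_high_fold (l : List Int) (a b : Int) :
    l.foldl (fun (s : Int × Int) i =>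
      if i > 50 ∨ PySem.Int.mod i 3 = 0 then (s.1, s.2 + 1) else (s.1 + 1, s.2)) (a, b)
    = (a + ((l.length : Int) - pvHigh l), b + pvHigh l) := by
  induction l generalizing a b with
  | nil => simp [pvHigh]
  | cons x xs ih =>
    rw [List.foldl_cons]
    by_cases h : x > 50 ∨ PySem.Int.mod x 3 = 0
    · rw [if_pos h, ih]
      unfold pvHigh
      rw [List.filter_cons, if_pos (by simpa using h)]
      refine Prod.ext ?_ ?_
      · simp
      · simp; ring
    · rw [if_neg h, ih]
      unfold pvHigh
      rw [List.filter_cons, if_neg (by simpa using h)]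
      refine Prod.ext ?_ ?_
      · simp; ring
      · simp

-- ===== VERDICT (by name: the statement is the Claim_ definition above) =====
theorem count_low_high_spec : Claim_equal_count_low_high := by
  intro l _
  unfold Spec_count_low_high count_low_high
  rw [count_low_high_alt_closed, count_low_high_fold]
  simp
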